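-- pv_equiv track=rewrite | github.com/stefanoandroni/advent-of-code | 2023/day-13/main.py | is_hr_reflection_line
-- ===== SOURCE A (Python) =====
-- def is_hr_reflection_line(i1, i2, p) -> bool:
--     if i1 < 0:
--         return True
--     if i2 > len(p) - 1:
--         return True
--     if (p[i1] != p[i2]):
--         return False
--     return is_hr_reflection_line(i1 - 1, i2 + 1, p)
-- ===== SOURCE B (Python) =====
-- def is_hr_reflection_line(i1, i2, p) -> bool:
--     steps = min(i1 + 1, len(p) - i2)
--     return all(p[i1 - k] == p[i2 + k] for k in range(steps))
-- ===== Notes on version B (the rewrite author's own statement) =====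
-- stated objective: idiomatic
-- what changed: Replaced A's tail recursion with a closed-form step count steps = min(i1+1, len(p)-i2) and one all(...) generator over range(steps) comparing the index pairs.
import Mathlib
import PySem

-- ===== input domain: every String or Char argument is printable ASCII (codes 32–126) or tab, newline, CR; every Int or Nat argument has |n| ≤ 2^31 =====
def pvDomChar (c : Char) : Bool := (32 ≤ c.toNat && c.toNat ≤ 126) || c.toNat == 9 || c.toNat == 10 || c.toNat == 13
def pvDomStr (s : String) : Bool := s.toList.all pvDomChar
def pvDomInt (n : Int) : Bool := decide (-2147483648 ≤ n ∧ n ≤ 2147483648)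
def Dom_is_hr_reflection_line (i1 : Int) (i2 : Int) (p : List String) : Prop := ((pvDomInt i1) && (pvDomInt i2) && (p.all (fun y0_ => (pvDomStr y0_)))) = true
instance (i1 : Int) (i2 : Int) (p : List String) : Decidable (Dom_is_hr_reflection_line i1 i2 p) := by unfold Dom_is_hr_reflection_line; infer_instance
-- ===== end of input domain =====

-- B replaces A's tail recursion by computing the number of comparison steps in closed form
-- (steps = min(i1+1, len(p)-i2)) and checking all index pairs with one all(...) comprehension (objective: idiomatic).

-- ===== PORT A =====
def is_hr_reflection_line (i1 : Int) (i2 : Int) (p : List String) : Bool :=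
  if i1 < 0 then true
  else if i2 > (p.length : Int) - 1 then true
  else if PySem.List.pyGet? p i1 ≠ PySem.List.pyGet? p i2 then false
  else is_hr_reflection_line (i1 - 1) (i2 + 1) p
termination_by (i1 + 1).toNat
decreasing_by omega

-- ===== PORT B =====
def is_hr_reflection_line_alt (i1 : Int) (i2 : Int) (p : List String) : Bool :=
  let steps := min (i1 + 1) ((p.length : Int) - i2)
  (PySem.List.pyRange 0 steps 1).all
    (fun k => PySem.List.pyGet? p (i1 - k) == PySem.List.pyGet? p (i2 + k))

-- ===== PRECONDITION & SPEC =====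
-- Pre_ excludes exactly the inputs on which A raises IndexError: i1 past the end of p,
-- or i2 below -len(p), while both index guards fail to fire.
def Pre_is_hr_reflection_line (i1 : Int) (i2 : Int) (p : List String) : Prop :=
  i1 < 0 ∨ (p.length : Int) ≤ i2 ∨ (i1 < (p.length : Int) ∧ -(p.length : Int) ≤ i2)
instance (i1 : Int) (i2 : Int) (p : List String) : Decidable (Pre_is_hr_reflection_line i1 i2 p) := by unfold Pre_is_hr_reflection_line; infer_instance

def pvWitness_is_hr_reflection_line : Int × Int × List String := (1, 2, ["a", "b", "b", "a"])

def Spec_is_hr_reflection_line (i1 : Int) (i2 : Int) (p : List String) (out : Bool) : Prop := out = is_hr_reflection_line_alt i1 i2 p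
instance (i1 : Int) (i2 : Int) (p : List String) (out : Bool) : Decidable (Spec_is_hr_reflection_line i1 i2 p out) := by unfold Spec_is_hr_reflection_line; infer_instance

-- ===== CLAIM (what is proved, stated in full; the proofs are below) =====
def Claim_equal_is_hr_reflection_line : Prop := ∀ (i1 : Int) (i2 : Int) (p : List String), Dom_is_hr_reflection_line i1 i2 p → Pre_is_hr_reflection_line i1 i2 p → Spec_is_hr_reflection_line i1 i2 p (is_hr_reflection_line i1 i2 p)

-- ===== LEMMAS AND PROOFS =====

-- unfolding B one comparison step when at least one step remains
lemma alt_step (i1 i2 : Int) (p : List String) (h1 : 0 ≤ i1) (h2 : i2 ≤ (p.length : Int) - 1) :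
    is_hr_reflection_line_alt i1 i2 p =
      ((PySem.List.pyGet? p i1 == PySem.List.pyGet? p i2) &&
        is_hr_reflection_line_alt (i1 - 1) (i2 + 1) p) := by
  unfold is_hr_reflection_line_alt
  dsimp only
  have hs : (0 : Int) < min (i1 + 1) ((p.length : Int) - i2) := by omega
  rw [PySem.List.pyRange_one_cons hs]
  simp only [List.all_cons, PySem.List.pyRange_one, List.all_map]
  have hn : (min (i1 + 1) ((p.length : Int) - i2) - (0 + 1)).toNat
      = (min (i1 - 1 + 1) ((p.length : Int) - (i2 + 1)) - 0).toNat := by omega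
  rw [hn]
  congr 1
  · norm_num
  · congr 1
    funext k
    simp only [Function.comp]
    congr 1 <;> congr 1 <;> omega

lemma alt_true_of_empty (i1 i2 : Int) (p : List String)
    (h : min (i1 + 1) ((p.length : Int) - i2) ≤ 0) :
    is_hr_reflection_line_alt i1 i2 p = true := by
  unfold is_hr_reflection_line_alt
  dsimp only
  rw [PySem.List.pyRange_one_eq_nil (by omega)]
  rfl

lemma main_eq (i1 i2 : Int) (p : List String) (hpre : Pre_is_hr_reflection_line i1 i2 p) :
    is_hr_reflection_line i1 i2 p = is_hr_reflection_line_alt i1 i2 p := by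
  unfold is_hr_reflection_line
  split_ifs with h1 h2 h3
  · exact (alt_true_of_empty _ _ _ (by omega)).symm
  · exact (alt_true_of_empty _ _ _ (by omega)).symm
  · rw [alt_step i1 i2 p (by omega) (by omega)]
    simp [beq_eq_false_iff_ne.mpr h3]
  · rw [alt_step i1 i2 p (by omega) (by omega)]
    have hget : (PySem.List.pyGet? p i1 == PySem.List.pyGet? p i2) = true := by
      simpa using not_not.mp h3
    rw [hget, Bool.true_and]
    have hpre' : Pre_is_hr_reflection_line (i1 - 1) (i2 + 1) p := by
      unfold Pre_is_hr_reflection_line at hpre ⊢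
      omega
    exact main_eq (i1 - 1) (i2 + 1) p hpre'
termination_by (i1 + 1).toNat
decreasing_by omega

-- ===== VERDICT (by name: the statement is the Claim_ definition above) =====
theorem is_hr_reflection_line_spec : Claim_equal_is_hr_reflection_line := by
  intro i1 i2 p _ hpre
  exact main_eq i1 i2 p hpre
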